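-- pv_equiv track=rewrite | github.com/Bilg4me/ensae-prog23 | delivery_network/trucks.py | nombre_maximal_trajet
-- ===== SOURCE A (Python) =====
-- def nombre_maximal_trajet(B, allocations):
-- 	allocations.sort(key = lambda x : x[1][1])
--
-- 	nb_trajet = 0
-- 	for (trajet,mtc) in allocations:
-- 		cost = mtc[1]
-- 		if B >= cost:
-- 			nb_trajet += 1
-- 			B -= cost
-- 		else:
-- 			break
--
-- 	return nb_trajet
-- ===== SOURCE B (Python) =====
-- def nombre_maximal_trajet(B, allocations):
--     # Selection without sorting: repeatedly take the cheapest remaining trip while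
--     # it is affordable. Note: unlike A, this does NOT sort `allocations` in place;
--     # the equivalence claimed is about the return value only.
--     costs = [mtc[1] for _, mtc in allocations]
--     nb_trajet = 0
--     while costs:
--         c = min(costs)
--         if B < c:
--             break
--         B -= c
--         costs.remove(c)
--         nb_trajet += 1
--     return nb_trajet
-- ===== Notes on version B (the rewrite author's own statement) =====
-- stated objective: alternative
-- what changed: Replaces A's sort-then-greedy-scan with an unsorted selection loop that repeatedly extracts the minimum remaining cost (min + remove) while it is affordable; B does not sort the argument in place as A does (return values agree).
import Mathlib
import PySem

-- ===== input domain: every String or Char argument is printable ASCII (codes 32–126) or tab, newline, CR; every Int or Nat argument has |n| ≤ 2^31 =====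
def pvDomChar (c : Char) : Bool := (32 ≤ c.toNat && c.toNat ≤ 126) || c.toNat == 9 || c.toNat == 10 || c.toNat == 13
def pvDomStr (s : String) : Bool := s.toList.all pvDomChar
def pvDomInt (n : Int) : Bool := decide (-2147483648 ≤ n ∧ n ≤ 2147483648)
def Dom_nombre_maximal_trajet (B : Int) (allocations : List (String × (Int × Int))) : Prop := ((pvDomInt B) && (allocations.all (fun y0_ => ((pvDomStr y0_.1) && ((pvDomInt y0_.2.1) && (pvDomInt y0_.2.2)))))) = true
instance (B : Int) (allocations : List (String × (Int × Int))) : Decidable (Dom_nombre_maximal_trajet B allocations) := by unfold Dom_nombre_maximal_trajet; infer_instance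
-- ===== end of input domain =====

-- B replaces A's sort-then-greedy-scan by selection without sorting: repeatedly extract the
-- cheapest remaining cost while affordable; A sorts `allocations` in place and B does not —
-- the equivalence proved here is about the return value only.

-- ===== PORT A =====
-- A's for-loop with break, carrying the shrinking budget B and the counter nb_trajet
def pvLoopA : Int → List (String × (Int × Int)) → Int → Int
  | _, [], nb => nb
  | B, (_, mtc) :: rest, nb =>
    let cost := mtc.2
    if B ≥ cost then pvLoopA (B - cost) rest (nb + 1) else nb

def nombre_maximal_trajet (B : Int) (allocations : List (String × (Int × Int))) : Int :=
  pvLoopA B (PySem.List.sorted allocations (fun x => x.2.2) false) 0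

-- ===== PORT B =====
-- B's while-loop: c = min(costs); if affordable, subtract it, costs.remove(c), count it.
-- Python's costs.remove(c) removes the first occurrence of c, which always exists since
-- c = min(costs) ∈ costs; by PySem.List.remove?_eq_some_erase it is exactly costs.erase c.
def pvLoopB (B : Int) (costs : List Int) : Int :=
  match h : PySem.List.min? costs (fun y => y) with
  | none => 0
  | some c =>
    if B < c then 0
    else 1 + pvLoopB (B - c) (costs.erase c)
termination_by costs.length
decreasing_by
  have hm := PySem.List.min?_mem h
  have h1 := List.length_erase_of_mem hm
  have h2 := List.length_pos_of_mem hm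
  omega

def nombre_maximal_trajet_alt (B : Int) (allocations : List (String × (Int × Int))) : Int :=
  pvLoopB B (allocations.map (fun x => x.2.2))

-- ===== PRECONDITION & SPEC =====
def Spec_nombre_maximal_trajet (B : Int) (allocations : List (String × (Int × Int))) (out : Int) : Prop := out = nombre_maximal_trajet_alt B allocations
instance (B : Int) (allocations : List (String × (Int × Int))) (out : Int) : Decidable (Spec_nombre_maximal_trajet B allocations out) := by unfold Spec_nombre_maximal_trajet; infer_instance

-- ===== CLAIM (what is proved, stated in full; the proofs are below) =====
def Claim_equal_nombre_maximal_trajet : Prop := ∀ (B : Int) (allocations : List (String × (Int × Int))), Dom_nombre_maximal_trajet B allocations → Spec_nombre_maximal_trajet B allocations (nombre_maximal_trajet B allocations)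

-- ===== LEMMAS AND PROOFS =====

-- greedy count on a bare cost list
def pvCount : Int → List Int → Int
  | _, [] => 0
  | B, c :: t => if B ≥ c then 1 + pvCount (B - c) t else 0

-- A's loop is pvCount over the cost projections, plus the accumulator
theorem pvLoopA_eq_count (l : List (String × (Int × Int))) :
    ∀ (B nb : Int), pvLoopA B l nb = nb + pvCount B (l.map (fun x => x.2.2)) := by
  induction l with
  | nil => intro B nb; simp [pvLoopA, pvCount]
  | cons hd tl ih =>
    intro B nb
    obtain ⟨_, mtc⟩ := hd
    simp only [pvLoopA, pvCount, List.map]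
    by_cases h : B ≥ mtc.2
    · rw [if_pos h, if_pos h, ih]; ring
    · rw [if_neg h, if_neg h]; ring

-- B's min-extraction loop equals pvCount over the id-sorted cost list
theorem pvLoopB_eq_count (n : Nat) : ∀ (costs : List Int), costs.length ≤ n → ∀ (B : Int),
    pvLoopB B costs = pvCount B (PySem.List.sorted costs (fun y => y) false) := by
  induction n with
  | zero =>
    intro costs hlen B
    have : costs = [] := List.eq_nil_of_length_eq_zero (Nat.le_zero.mp hlen)
    subst this
    rw [pvLoopB]
    simp [PySem.List.min?, pvCount, (PySem.List.sorted_eq_nil_iff ([] : List Int) (fun y => y) false).mpr rfl]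
  | succ n ih =>
    intro costs hlen B
    rw [pvLoopB]
    cases hmin : PySem.List.min? costs (fun y => y) with
    | none =>
      have : costs = [] := (PySem.List.min?_eq_none_iff costs (fun y => y)).mp hmin
      subst this
      simp [pvCount, (PySem.List.sorted_eq_nil_iff ([] : List Int) (fun y => y) false).mpr rfl]
    | some c =>
      have hcmem : c ∈ costs := PySem.List.min?_mem hmin
      have hne : costs ≠ [] := by intro h; subst h; simp at hcmem
      -- the sorted list is nonempty; name its head and tail
      cases hs : PySem.List.sorted costs (fun y => y) false with
      | nil => exact absurd ((PySem.List.sorted_eq_nil_iff costs (fun y => y) false).mp hs) hne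
      | cons m t =>
        -- head of the sorted list is the minimum value, hence equals c
        have hperm : (m :: t).Perm costs := hs ▸ PySem.List.sorted_perm costs _ _
        have hmmem : m ∈ costs := hperm.mem_iff.mp (by simp)
        have h1 : m ≤ c := PySem.List.key_head_sorted_le costs (fun y => y) hs c hcmem
        have h2 : c ≤ m := PySem.List.min?_isMin hmin m hmmem
        have hmc : m = c := le_antisymm h1 h2
        subst hmc
        -- the erased list sorts to the tail t
        have htpw : t.Pairwise (fun a b : Int => a ≤ b) := by
          have := PySem.List.sorted_pairwise costs (fun y : Int => y) (κ := Int)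
          rw [hs] at this
          exact (List.pairwise_cons.mp this).2
        have hep : t.Perm (costs.erase m) := by
          have := hperm.erase m
          simpa using this
        have hst : PySem.List.sorted (costs.erase m) (fun y => y) false = t :=
          PySem.List.sorted_id_eq_of_perm_of_pairwise (costs.erase m) t hep htpw
        have hlen' : (costs.erase m).length ≤ n := by
          have h1 := List.length_erase_of_mem hcmem
          have h2 := List.length_pos_of_mem hcmem
          omega
        show (if B < m then 0 else 1 + pvLoopB (B - m) (costs.erase m)) = pvCount B (m :: t)
        simp only [pvCount]
        by_cases hb : B < m
        · rw [if_pos hb, if_neg (by omega : ¬ B ≥ m)]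
        · rw [if_neg hb, if_pos (by omega : B ≥ m), ih _ hlen' (B - m), hst]

-- A's key-sorted pair list projects to the id-sorted cost list
theorem map_sorted_eq (allocations : List (String × (Int × Int))) :
    (PySem.List.sorted allocations (fun x => x.2.2) false).map (fun x => x.2.2) =
    PySem.List.sorted (allocations.map (fun x => x.2.2)) (fun y => y) false := by
  refine (PySem.List.sorted_id_eq_of_perm_of_pairwise _ _ ?_ ?_).symm
  · exact (PySem.List.sorted_perm allocations _ _).map _
  · exact PySem.List.sorted_map_key_pairwise allocations _

-- ===== VERDICT (by name: the statement is the Claim_ definition above) =====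
theorem nombre_maximal_trajet_spec : Claim_equal_nombre_maximal_trajet := by
  intro B allocations _
  unfold Spec_nombre_maximal_trajet nombre_maximal_trajet nombre_maximal_trajet_alt
  rw [pvLoopA_eq_count, pvLoopB_eq_count (allocations.map (fun x => x.2.2)).length _ rfl.le,
    map_sorted_eq]
  ring
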